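-- pv_equiv track=rewrite | github.com/NaceurJed/celfernandes | RecoHnM/fun/metrics.py | convert_dico_actual_predicted
-- ===== SOURCE A (Python) =====
-- import collections
--
-- def convert_dico_actual_predicted(dict_actual,dict_pred):
--
--     #First, reduce the dictionnaries to the keys, values for which the keys are in both dicts
--     dict_actual_filtered = {key:dict_actual[key] for key in dict_actual if key in dict_pred }
--     dict_pred_filtered = {key:dict_pred[key] for key in dict_pred if key in dict_actual }
--
--     #Now, order the dictionnaries accordingly to the keys
--     dict_actual_filtered_ordered = dict(collections.OrderedDict(sorted(dict_actual_filtered.items())))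
--     dict_pred_filtered_ordered = dict(collections.OrderedDict(sorted(dict_pred_filtered.items())))
--
--     #Since they are well ordrered and contain the same keys, we only need to convert into lists.
--     actual= [dict_actual_filtered_ordered.get(key,0) for key in dict_actual_filtered_ordered]
--     pred = [dict_pred_filtered_ordered.get(key,0) for key in dict_pred_filtered_ordered]
--     return actual, pred
-- ===== SOURCE B (Python) =====
-- def convert_dico_actual_predicted(dict_actual, dict_pred):
--     # Sort-merge join: sort both item lists once, then advance two cursors,
--     # emitting the paired values whenever the keys coincide.
--     a_items = sorted(dict_actual.items())
--     p_items = sorted(dict_pred.items())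
--     actual, pred = [], []
--     i = j = 0
--     while i < len(a_items) and j < len(p_items):
--         ka, va = a_items[i]
--         kp, vp = p_items[j]
--         if ka == kp:
--             actual.append(va)
--             pred.append(vp)
--             i += 1
--             j += 1
--         elif ka < kp:
--             i += 1
--         else:
--             j += 1
--     return actual, pred
-- ===== Notes on version B (the rewrite author's own statement) =====
-- stated objective: alternative
-- what changed: B is a sort-merge join: it sorts both item lists once and walks them with two cursors, emitting paired values at equal keys, instead of A's two membership-filtered intermediate dicts, two separate sorts and two dict-rebuild-then-iterate passes.
import Mathlib
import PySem

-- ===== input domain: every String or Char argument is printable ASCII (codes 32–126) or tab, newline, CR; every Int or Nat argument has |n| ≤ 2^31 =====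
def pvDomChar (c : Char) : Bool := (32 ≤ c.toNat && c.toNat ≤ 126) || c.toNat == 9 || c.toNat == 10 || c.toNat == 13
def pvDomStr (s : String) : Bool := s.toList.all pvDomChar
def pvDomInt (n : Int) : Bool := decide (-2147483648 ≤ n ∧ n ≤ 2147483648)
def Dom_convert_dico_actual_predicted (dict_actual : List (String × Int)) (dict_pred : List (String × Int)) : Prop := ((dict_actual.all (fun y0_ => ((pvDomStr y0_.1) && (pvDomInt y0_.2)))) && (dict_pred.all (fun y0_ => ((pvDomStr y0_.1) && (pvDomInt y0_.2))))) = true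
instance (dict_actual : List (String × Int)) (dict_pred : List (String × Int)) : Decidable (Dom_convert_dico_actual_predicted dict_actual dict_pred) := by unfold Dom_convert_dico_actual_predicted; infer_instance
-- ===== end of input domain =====

-- B replaces A's two membership-filtered intermediate dicts, two sorts and two
-- dict-rebuild-then-iterate passes with a sort-merge join (objective: alternative; return value only).

-- ===== PORT A =====
-- The dict parameters arrive as association lists; PySem.Dict.ofList reproduces Python's dict
-- construction from them (first position, last value). A's `dict_actual[key]` lookups can never
-- miss (key ranges over that very dict), so they are ported as getD with an unused default.
def convert_dico_actual_predicted (dict_actual : List (String × Int)) (dict_pred : List (String × Int)) : List Int × List Int :=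
  let da := PySem.Dict.ofList dict_actual
  let dp := PySem.Dict.ofList dict_pred
  -- dict_actual_filtered = {key: dict_actual[key] for key in dict_actual if key in dict_pred}
  let fa := da.keys.foldl (fun d k => if dp.contains k then d.insert k (da.getD k 0) else d) PySem.Dict.empty
  -- dict_pred_filtered = {key: dict_pred[key] for key in dict_pred if key in dict_actual}
  let fp := dp.keys.foldl (fun d k => if da.contains k then d.insert k (dp.getD k 0) else d) PySem.Dict.empty
  -- dict(collections.OrderedDict(sorted(d.items())))  (sorted of pairs = Python tuple order)
  let fao : PySem.Dict String Int := PySem.Dict.mk (PySem.List.sorted2 fa.items (fun p => p.1) (fun p => p.2))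
  let fpo : PySem.Dict String Int := PySem.Dict.mk (PySem.List.sorted2 fp.items (fun p => p.1) (fun p => p.2))
  -- actual = [d.get(key, 0) for key in d]   /   pred likewise
  let actual := fao.keys.map (fun k => fao.getD k 0)
  let pred := fpo.keys.map (fun k => fpo.getD k 0)
  (actual, pred)

-- ===== PORT B =====
-- the while loop over the two cursors i, j: structural recursion on the two sorted item lists
def pvMergeJoin : List (String × Int) → List (String × Int) → List Int × List Int
  | [], _ => ([], [])
  | _ :: _, [] => ([], [])
  | (ka, va) :: ta, (kp, vp) :: tp =>
    if ka == kp then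
      let r := pvMergeJoin ta tp
      (va :: r.1, vp :: r.2)
    else if ka < kp then pvMergeJoin ta ((kp, vp) :: tp)
    else pvMergeJoin ((ka, va) :: ta) tp

-- a_items = sorted(dict_actual.items()); p_items = sorted(dict_pred.items()); then the merge loop
def convert_dico_actual_predicted_alt (dict_actual : List (String × Int)) (dict_pred : List (String × Int)) : List Int × List Int :=
  let aItems := PySem.List.sorted2 (PySem.Dict.ofList dict_actual).items (fun p => p.1) (fun p => p.2)
  let pItems := PySem.List.sorted2 (PySem.Dict.ofList dict_pred).items (fun p => p.1) (fun p => p.2)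
  pvMergeJoin aItems pItems

-- ===== PRECONDITION & SPEC =====
def Spec_convert_dico_actual_predicted (dict_actual : List (String × Int)) (dict_pred : List (String × Int)) (out : List Int × List Int) : Prop := out = convert_dico_actual_predicted_alt dict_actual dict_pred
instance (dict_actual : List (String × Int)) (dict_pred : List (String × Int)) (out : List Int × List Int) : Decidable (Spec_convert_dico_actual_predicted dict_actual dict_pred out) := by unfold Spec_convert_dico_actual_predicted; infer_instance

-- ===== CLAIM (what is proved, stated in full; the proofs are below) =====
def Claim_equal_convert_dico_actual_predicted : Prop := ∀ (dict_actual : List (String × Int)) (dict_pred : List (String × Int)), Dom_convert_dico_actual_predicted dict_actual dict_pred → Spec_convert_dico_actual_predicted dict_actual dict_pred (convert_dico_actual_predicted dict_actual dict_pred)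

-- ===== LEMMAS AND PROOFS =====

-- insertBy inserts its element somewhere: the result is a permutation of x :: ys.
theorem pv_insertBy_perm {α : Type} (b : α → α → Bool) (x : α) (ys : List α) :
    (PySem.List.insertBy b x ys).Perm (x :: ys) := by
  induction ys with
  | nil => simp [PySem.List.insertBy]
  | cons y ys ih =>
    simp only [PySem.List.insertBy]
    split
    · exact List.Perm.refl _
    · exact (ih.cons y).trans (List.Perm.swap x y ys)

-- insertBy only compares x against members of acc.
theorem pv_insertBy_congr {α : Type} (b1 b2 : α → α → Bool) (x : α) (acc : List α)
    (h : ∀ y ∈ acc, b1 x y = b2 x y) :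
    PySem.List.insertBy b1 x acc = PySem.List.insertBy b2 x acc := by
  induction acc with
  | nil => rfl
  | cons y ys ih =>
    simp only [PySem.List.insertBy]
    rw [h y (by simp)]
    split
    · rfl
    · rw [ih (fun z hz => h z (by simp [hz]))]

-- On pair lists with pairwise-distinct first components, Python's lexicographic pair sort
-- coincides with sorting by the first component.
theorem pv_sorted2_eq_sorted_fst (l : List (String × Int)) (h : (l.map Prod.fst).Nodup) :
    PySem.List.sorted2 l (fun p => p.1) (fun p => p.2) = PySem.List.sorted l (fun p => p.1) := by
  have aux : ∀ (l acc : List (String × Int)), ((acc ++ l).map Prod.fst).Nodup →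
      l.foldl (fun acc x => PySem.List.insertBy
          (fun a b => decide (a.1 < b.1) || (!decide (b.1 < a.1) && decide (a.2 < b.2))) x acc) acc
        = l.foldl (fun acc x => PySem.List.insertBy (fun a b => decide (a.1 < b.1)) x acc) acc := by
    intro l
    induction l with
    | nil => intro acc _; rfl
    | cons x t ih =>
      intro acc hnd
      have hne : ∀ y ∈ acc, y.1 ≠ x.1 := by
        intro y hy
        have := hnd
        simp only [List.map_append, List.nodup_append] at this
        exact this.2.2 y.1 (List.mem_map_of_mem hy) x.1 (by simp)
      have hcongr : PySem.List.insertBy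
          (fun a b => decide (a.1 < b.1) || (!decide (b.1 < a.1) && decide (a.2 < b.2))) x acc
          = PySem.List.insertBy (fun a b => decide (a.1 < b.1)) x acc := by
        apply pv_insertBy_congr
        intro y hy
        rcases lt_trichotomy x.1 y.1 with hl | he | hg
        · simp [hl, not_lt_of_gt hl]
        · exact absurd he.symm (hne y hy)
        · simp [hg, not_lt_of_gt hg]
      simp only [List.foldl_cons, hcongr]
      apply ih
      have hperm : (PySem.List.insertBy (fun a b => decide (a.1 < b.1)) x acc ++ t).Perm (acc ++ x :: t) := by
        refine ((pv_insertBy_perm _ x acc).append_right t).trans ?_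
        exact (List.perm_middle).symm
      exact ((hperm.map Prod.fst).nodup_iff).mpr hnd
  show List.foldl _ [] l = List.foldl _ [] l
  exact aux l [] (by simpa using h)

-- A dict-comprehension loop over fresh distinct keys appends exactly the filtered items.
theorem pv_foldl_filter_insert_items (P : String → Bool) (g : String → Int) :
    ∀ (l : List String) (d : PySem.Dict String Int), (d.keys ++ l).Nodup →
    (l.foldl (fun d k => if P k then d.insert k (g k) else d) d).items
      = d.items ++ (l.filter P).map (fun k => (k, g k)) := by
  intro l
  induction l with
  | nil => intro d _; simp
  | cons k t ih =>
    intro d hnd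
    have hk : k ∉ d.keys := by
      simp only [List.nodup_append] at hnd
      exact fun hm => hnd.2.2 k hm k (by simp) rfl
    have hc : d.contains k = false := by
      rcases hcc : d.contains k with _ | _
      · rfl
      · exact absurd ((PySem.Dict.contains_iff_mem_keys d k).mp hcc) hk
    simp only [List.foldl_cons, List.filter_cons]
    by_cases hP : P k = true
    · rw [if_pos hP, if_pos hP]
      rw [ih (d.insert k (g k)) ?_, PySem.Dict.items_insert_of_not_contains d (g k) hc]
      · simp
      · have hkeys : (d.insert k (g k)).keys = d.keys ++ [k] := by
          show ((d.insert k (g k)).items.map Prod.fst) = _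
          rw [PySem.Dict.items_insert_of_not_contains d (g k) hc]
          simp [PySem.Dict.keys]
        rw [hkeys]
        have : (d.keys ++ [k] ++ t).Perm (d.keys ++ k :: t) := by
          simp [(List.perm_middle (a := k) (l₁ := d.keys) (l₂ := t)).symm]
        exact this.nodup_iff.mpr hnd
    · rw [if_neg hP, if_neg hP]
      rw [ih d ?_]
      simp only [List.nodup_append] at hnd ⊢
      exact ⟨hnd.1, hnd.2.1.of_cons, fun a ha b hb => hnd.2.2 a ha b (List.mem_cons_of_mem k hb)⟩

-- keys of a literal dict with distinct keys looked up in itself give back the values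
theorem pv_mk_keys_map_getD (l : List (String × Int)) (h : (l.map Prod.fst).Nodup) :
    (PySem.Dict.mk l).keys.map (fun k => (PySem.Dict.mk l).getD k 0) = l.map Prod.snd := by
  induction l with
  | nil => rfl
  | cons p t ih =>
    obtain ⟨k, v⟩ := p
    simp only [List.map_cons, List.nodup_cons] at h
    have hhead : (PySem.Dict.mk ((k, v) :: t)).getD k 0 = v := by
      simp [PySem.Dict.getD_eq_get?_getD, PySem.Dict.get?_mk_cons]
    have htail : ∀ x ∈ t.map Prod.fst,
        (PySem.Dict.mk ((k, v) :: t)).getD x 0 = (PySem.Dict.mk t).getD x 0 := by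
      intro x hx
      have : k ≠ x := fun he => h.1 (he ▸ hx)
      simp [PySem.Dict.getD_eq_get?_getD, PySem.Dict.get?_mk_cons, this]
    calc (PySem.Dict.mk ((k, v) :: t)).keys.map (fun x => (PySem.Dict.mk ((k, v) :: t)).getD x 0)
        = v :: (t.map Prod.fst).map (fun x => (PySem.Dict.mk ((k, v) :: t)).getD x 0) := by
          simp [PySem.Dict.keys, hhead]
      _ = v :: (t.map Prod.fst).map (fun x => (PySem.Dict.mk t).getD x 0) := by
          rw [List.map_congr_left htail]
      _ = v :: t.map Prod.snd := by
          have := ih h.2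
          simpa [PySem.Dict.keys] using this
      _ = ((k, v) :: t).map Prod.snd := by simp

-- a strictly increasing view of sorted K for nodup K
theorem pv_sorted_id_pairwise_lt (K : List String) (h : K.Nodup) :
    (PySem.List.sorted K (fun k => k)).Pairwise (· < ·) := by
  have hperm := PySem.List.sorted_perm K (fun k => k) false
  have hnd : (PySem.List.sorted K (fun k => k)).Nodup := hperm.nodup_iff.mpr h
  have hle := PySem.List.sorted_pairwise K (fun k => k)
  exact (hle.and hnd).imp (fun hab => lt_of_le_of_ne hab.1 hab.2)

-- one side of A: filtered dict → sorted → extracted values, characterised by its key list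
theorem pv_side (dx dy : PySem.Dict String Int) (hndx : dx.keys.Nodup) :
    (PySem.Dict.mk (PySem.List.sorted2
        (dx.keys.foldl (fun d k => if dy.contains k then d.insert k (dx.getD k 0) else d) PySem.Dict.empty).items
        (fun p => p.1) (fun p => p.2))).keys.map
      (fun k => (PySem.Dict.mk (PySem.List.sorted2
        (dx.keys.foldl (fun d k => if dy.contains k then d.insert k (dx.getD k 0) else d) PySem.Dict.empty).items
        (fun p => p.1) (fun p => p.2))).getD k 0)
    = (PySem.List.sorted (dx.keys.filter (fun k => dy.contains k)) (fun k => k)).map (fun k => dx.getD k 0) := by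
  set K := dx.keys.filter (fun k => dy.contains k) with hK
  have hKnd : K.Nodup := hndx.filter _
  have hitems : (dx.keys.foldl (fun d k => if dy.contains k then d.insert k (dx.getD k 0) else d) PySem.Dict.empty).items
      = K.map (fun k => (k, dx.getD k 0)) := by
    rw [pv_foldl_filter_insert_items (fun k => dy.contains k) (fun k => dx.getD k 0) dx.keys PySem.Dict.empty
      (by simpa [PySem.Dict.empty, PySem.Dict.keys] using hndx)]
    simp [PySem.Dict.empty, hK]
  have hfst : (K.map (fun k => (k, dx.getD k 0))).map Prod.fst = K := by
    simp [Function.comp_def]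
  have hsorted2 : PySem.List.sorted2 (K.map (fun k => (k, dx.getD k 0))) (fun p => p.1) (fun p => p.2)
      = PySem.List.sorted (K.map (fun k => (k, dx.getD k 0))) (fun p => p.1) :=
    pv_sorted2_eq_sorted_fst _ (by rw [hfst]; exact hKnd)
  have hsorted : PySem.List.sorted (K.map (fun k => (k, dx.getD k 0))) (fun p => p.1)
      = (PySem.List.sorted K (fun k => k)).map (fun k => (k, dx.getD k 0)) := by
    apply PySem.List.sorted_eq_of_perm_of_pairwise_lt
    · exact ((PySem.List.sorted_perm K (fun k => k) false).map _)
    · rw [List.pairwise_map]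
      exact pv_sorted_id_pairwise_lt K hKnd
  rw [hitems, hsorted2, hsorted]
  rw [pv_mk_keys_map_getD _ (by
    rw [List.map_map]
    have hid : (Prod.fst ∘ fun k => (k, dx.getD k 0)) = id := by funext x; rfl
    rw [hid, List.map_id]
    exact ((PySem.List.sorted_perm K (fun k => k) false).nodup_iff).mpr hKnd)]
  rw [List.map_map]
  rfl

-- the merge join of two strictly key-increasing pair lists is the pair of
-- membership-filtered value lists
theorem pv_mergeJoin_eq (la lp : List (String × Int))
    (ha : la.Pairwise (fun p q => p.1 < q.1)) (hp : lp.Pairwise (fun p q => p.1 < q.1)) :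
    pvMergeJoin la lp
      = ((la.filter (fun p => (lp.map Prod.fst).contains p.1)).map Prod.snd,
         (lp.filter (fun p => (la.map Prod.fst).contains p.1)).map Prod.snd) := by
  induction la generalizing lp with
  | nil =>
    simp [pvMergeJoin]
  | cons a ta iha =>
    induction lp with
    | nil => simp [pvMergeJoin]
    | cons p tp ihp =>
      obtain ⟨ka, va⟩ := a
      obtain ⟨kp, vp⟩ := p
      rw [List.pairwise_cons] at ha hp
      by_cases hk : ka = kp
      · subst hk
        have h1 : ta.filter (fun q => q.1 == ka || (tp.map Prod.fst).contains q.1)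
            = ta.filter (fun q => (tp.map Prod.fst).contains q.1) := by
          apply List.filter_congr
          intro q hq
          have : q.1 ≠ ka := fun he => absurd (he ▸ ha.1 q hq) (lt_irrefl _)
          simp [this]
        have h2 : tp.filter (fun q => q.1 == ka || (ta.map Prod.fst).contains q.1)
            = tp.filter (fun q => (ta.map Prod.fst).contains q.1) := by
          apply List.filter_congr
          intro q hq
          have : q.1 ≠ ka := fun he => absurd (he ▸ hp.1 q hq) (lt_irrefl _)
          simp [this]
        have hstep : pvMergeJoin ((ka, va) :: ta) ((ka, vp) :: tp)
            = (va :: (pvMergeJoin ta tp).1, vp :: (pvMergeJoin ta tp).2) := by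
          simp [pvMergeJoin]
        rw [hstep, iha tp ha.2 hp.2]
        simp only [List.filter_cons, List.map_cons, List.contains_cons, beq_self_eq_true,
          Bool.true_or, if_true, h1, h2]
      · have hne : (ka == kp) = false := beq_eq_false_iff_ne.mpr hk
        have hne' : (kp == ka) = false := beq_eq_false_iff_ne.mpr (Ne.symm hk)
        by_cases hlt : ka < kp
        · have hna : (((kp, vp) :: tp).map Prod.fst).contains ka = false := by
            rw [List.contains_eq_mem]
            simp only [decide_eq_false_iff_not, List.mem_map, not_exists]
            rintro q ⟨hq, he⟩
            rcases List.mem_cons.mp hq with h | h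
            · rw [h] at he; exact hk he.symm
            · exact absurd (he ▸ (hlt.trans (hp.1 q h))) (lt_irrefl _)
          have h2 : tp.filter (fun q => q.1 == ka || (ta.map Prod.fst).contains q.1)
              = tp.filter (fun q => (ta.map Prod.fst).contains q.1) := by
            apply List.filter_congr
            intro q hq
            have : q.1 ≠ ka := fun he => absurd (he ▸ (hlt.trans (hp.1 q hq))) (lt_irrefl _)
            simp [this]
          have hstep : pvMergeJoin ((ka, va) :: ta) ((kp, vp) :: tp)
              = pvMergeJoin ta ((kp, vp) :: tp) := by
            simp [pvMergeJoin, hne, hlt]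
          rw [hstep, iha ((kp, vp) :: tp) ha.2 (List.pairwise_cons.mpr hp)]
          refine Prod.ext ?_ ?_
          · simp only [List.filter_cons, hna, Bool.false_eq_true, if_false]
          · simp only [List.filter_cons, List.map_cons, List.contains_cons, hne',
              Bool.false_or, h2]
        · have hgt : kp < ka := lt_of_le_of_ne (not_lt.mp hlt) (Ne.symm hk)
          have hnp : (((ka, va) :: ta).map Prod.fst).contains kp = false := by
            rw [List.contains_eq_mem]
            simp only [decide_eq_false_iff_not, List.mem_map, not_exists]
            rintro q ⟨hq, he⟩
            rcases List.mem_cons.mp hq with h | h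
            · rw [h] at he; exact hk he
            · exact absurd (he ▸ (hgt.trans (ha.1 q h))) (lt_irrefl _)
          have h1 : ta.filter (fun q => q.1 == kp || (tp.map Prod.fst).contains q.1)
              = ta.filter (fun q => (tp.map Prod.fst).contains q.1) := by
            apply List.filter_congr
            intro q hq
            have : q.1 ≠ kp := fun he => absurd (he ▸ (hgt.trans (ha.1 q hq))) (lt_irrefl _)
            simp [this]
          have hstep : pvMergeJoin ((ka, va) :: ta) ((kp, vp) :: tp)
              = pvMergeJoin ((ka, va) :: ta) tp := by
            simp [pvMergeJoin, hne, hlt]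
          rw [hstep, ihp hp.2]
          refine Prod.ext ?_ ?_
          · simp only [List.filter_cons, List.map_cons, List.contains_cons, hne,
              Bool.false_or, h1]
          · simp only [List.filter_cons, hnp, Bool.false_eq_true, if_false]

-- sorted items of a dict = paired walk over its sorted keys
theorem pv_sorted_items (d : PySem.Dict String Int) (hnd : d.keys.Nodup) :
    PySem.List.sorted2 d.items (fun p => p.1) (fun p => p.2)
      = (PySem.List.sorted d.keys (fun k => k)).map (fun k => (k, d.getD k 0)) := by
  have hitems : d.items = d.keys.map (fun k => (k, d.getD k 0)) :=
    PySem.Dict.items_eq_map_keys d hnd 0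
  have hfst : (d.keys.map (fun k => (k, d.getD k 0))).map Prod.fst = d.keys := by
    simp [Function.comp_def]
  rw [hitems, pv_sorted2_eq_sorted_fst _ (by rw [hfst]; exact hnd)]
  apply PySem.List.sorted_eq_of_perm_of_pairwise_lt
  · exact ((PySem.List.sorted_perm d.keys (fun k => k) false).map _)
  · rw [List.pairwise_map]
    exact pv_sorted_id_pairwise_lt d.keys hnd

-- filtering a sorted nodup list = sorting the filtered list
theorem pv_filter_sorted (K : List String) (P : String → Bool) (h : K.Nodup) :
    (PySem.List.sorted K (fun k => k)).filter P = PySem.List.sorted (K.filter P) (fun k => k) := by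
  symm
  apply PySem.List.sorted_eq_of_perm_of_pairwise_lt
  · exact (PySem.List.sorted_perm K (fun k => k) false).filter P
  · exact List.Pairwise.sublist List.filter_sublist (pv_sorted_id_pairwise_lt K h)

-- ===== VERDICT (by name: the statement is the Claim_ definition above) =====
theorem convert_dico_actual_predicted_spec : Claim_equal_convert_dico_actual_predicted := by
  intro dict_actual dict_pred _
  show convert_dico_actual_predicted dict_actual dict_pred = convert_dico_actual_predicted_alt dict_actual dict_pred
  simp only [convert_dico_actual_predicted, convert_dico_actual_predicted_alt]
  set da := PySem.Dict.ofList dict_actual with hda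
  set dp := PySem.Dict.ofList dict_pred with hdp
  have hnda : da.keys.Nodup := PySem.Dict.nodup_keys_ofList dict_actual
  have hndp : dp.keys.Nodup := PySem.Dict.nodup_keys_ofList dict_pred
  -- characterise B
  rw [pv_sorted_items da hnda, pv_sorted_items dp hndp]
  rw [pv_mergeJoin_eq _ _
    (by rw [List.pairwise_map]; exact pv_sorted_id_pairwise_lt da.keys hnda)
    (by rw [List.pairwise_map]; exact pv_sorted_id_pairwise_lt dp.keys hndp)]
  have hside : ∀ (dx dy : PySem.Dict String Int), dx.keys.Nodup → dy.keys.Nodup →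
      (((PySem.List.sorted dx.keys (fun k => k)).map (fun k => (k, dx.getD k 0))).filter
        (fun p => (((PySem.List.sorted dy.keys (fun k => k)).map (fun k => (k, dy.getD k 0))).map Prod.fst).contains p.1)).map Prod.snd
      = (PySem.List.sorted (dx.keys.filter (fun k => dy.contains k)) (fun k => k)).map (fun k => dx.getD k 0) := by
    intro dx dy hndx hndy
    have hfst : ((PySem.List.sorted dy.keys (fun k => k)).map (fun k => (k, dy.getD k 0))).map Prod.fst
        = PySem.List.sorted dy.keys (fun k => k) := by
      simp [Function.comp_def]
    rw [hfst, List.filter_map, List.map_map]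
    have hpred : ∀ k ∈ PySem.List.sorted dx.keys (fun k => k),
        ((fun p => (PySem.List.sorted dy.keys (fun k => k)).contains p.1) ∘ (fun k => (k, dx.getD k 0))) k
        = dy.contains k := by
      intro k _
      show (PySem.List.sorted dy.keys (fun k => k)).contains k = dy.contains k
      rw [List.contains_eq_mem]
      rcases hc : dy.contains k with _ | _
      · simp only [decide_eq_false_iff_not, PySem.List.mem_sorted]
        intro hm
        exact absurd ((PySem.Dict.contains_iff_mem_keys dy k).mpr hm) (by simp [hc])
      · simp only [decide_eq_true_eq, PySem.List.mem_sorted]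
        exact (PySem.Dict.contains_iff_mem_keys dy k).mp hc
    rw [List.filter_congr hpred, pv_filter_sorted dx.keys _ hndx]
    rfl
  refine Prod.ext ?_ ?_
  · rw [pv_side da dp hnda, hside da dp hnda hndp]
  · rw [pv_side dp da hndp, hside dp da hndp hnda]
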